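-- pv_equiv track=rewrite | github.com/bansalanikait/ai-secure | app/fuzzing_engine.py | _header_diff_count
-- ===== SOURCE A (Python) =====
-- from typing import Any, Dict, List, Optional, Set, Tuple
--
-- def _normalize_headers_map(headers: Any) -> Dict[str, str]:
--     if not isinstance(headers, dict):
--         return {}
--     normalized: Dict[str, str] = {}
--     for key, value in headers.items():
--         k = str(key or "").strip().lower()
--         if not k:
--             continue
--         normalized[k] = str(value or "").strip()
--     return normalized
--
-- def _header_diff_count(left: Dict[str, str], right: Dict[str, str]) -> int:
--     a = _normalize_headers_map(left)
--     b = _normalize_headers_map(right)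
--     all_keys = set(a.keys()).union(b.keys())
--     diffs = 0
--     for key in all_keys:
--         if a.get(key, "") != b.get(key, ""):
--             diffs += 1
--     return diffs
-- ===== SOURCE B (Python) =====
-- from typing import Any, Dict
--
-- def _norm(headers: Any) -> Dict[str, str]:
--     if not isinstance(headers, dict):
--         return {}
--     out: Dict[str, str] = {}
--     for key, value in headers.items():
--         k = str(key or "").strip().lower()
--         if k:
--             out[k] = str(value or "").strip()
--     return out
--
-- def _header_diff_count(left: Dict[str, str], right: Dict[str, str]) -> int:
--     # Drop empty-valued keys (indistinguishable from absent under the "" default),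
--     # then count distinct keys in the symmetric difference of the item sets.
--     a = {k: v for k, v in _norm(left).items() if v}
--     b = {k: v for k, v in _norm(right).items() if v}
--     diff_items = set(a.items()) ^ set(b.items())
--     return len({k for k, _ in diff_items})
-- ===== Notes on version B (the rewrite author's own statement) =====
-- stated objective: idiomatic
-- what changed: Replaces the union-of-keys loop with per-key get-default comparison by filtering out empty-valued keys (equal to absent under the '' default) and counting the distinct keys of the symmetric difference of the two item sets.
import Mathlib
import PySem

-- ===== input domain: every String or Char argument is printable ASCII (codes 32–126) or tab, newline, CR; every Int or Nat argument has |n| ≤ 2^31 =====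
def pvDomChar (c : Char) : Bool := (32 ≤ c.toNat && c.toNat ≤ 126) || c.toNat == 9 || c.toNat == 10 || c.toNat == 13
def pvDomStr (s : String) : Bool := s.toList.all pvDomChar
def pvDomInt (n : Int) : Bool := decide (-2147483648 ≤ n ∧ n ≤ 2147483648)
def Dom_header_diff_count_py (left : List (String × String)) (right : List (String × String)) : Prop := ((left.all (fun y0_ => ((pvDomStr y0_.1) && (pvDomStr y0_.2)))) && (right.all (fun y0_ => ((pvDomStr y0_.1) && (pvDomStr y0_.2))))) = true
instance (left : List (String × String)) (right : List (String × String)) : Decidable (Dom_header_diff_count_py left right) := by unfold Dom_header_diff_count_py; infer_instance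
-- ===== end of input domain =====

-- B: same normalization, then drops empty-valued keys and counts distinct keys of the
-- symmetric difference of the two item sets (idiomatic set algebra instead of a key-union loop).

-- ===== PORT A =====
-- shared helper: both Pythons normalize a header map with identical code
-- ('str(key or "").strip().lower()' = lower∘strip on a str key; skip blank keys; value 'str(value or "").strip()' = strip)
-- the loop body of _normalize_headers_map (k = str(key).strip().lower() written inline)
def pvNormStep (d : PySem.Dict String String) (kv : String × String) : PySem.Dict String String :=
  if PySem.Str.lower (PySem.Str.strip kv.1) = "" then d
  else d.insert (PySem.Str.lower (PySem.Str.strip kv.1)) (PySem.Str.strip kv.2)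

def pvNorm (headers : List (String × String)) : PySem.Dict String String :=
  headers.foldl pvNormStep PySem.Dict.empty

def header_diff_count_py (left : List (String × String)) (right : List (String × String)) : Int :=
  let a := pvNorm left
  let b := pvNorm right
  let allKeys := PySem.Set.union (PySem.Set.ofList a.keys) b.keys
  allKeys.foldl (fun diffs key => if a.getD key "" ≠ b.getD key "" then diffs + 1 else diffs) 0

-- ===== PORT B =====
def header_diff_count_py_alt (left : List (String × String)) (right : List (String × String)) : Int :=
  let a := (pvNorm left).items.filter (fun p => p.2 ≠ "")
  let b := (pvNorm right).items.filter (fun p => p.2 ≠ "")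
  let diffItems := PySem.Set.symmDiff (PySem.Set.ofList a) (PySem.Set.ofList b)
  ((PySem.Set.ofList (diffItems.map (·.1))).length : Int)

-- ===== PRECONDITION & SPEC =====
def Spec_header_diff_count_py (left : List (String × String)) (right : List (String × String)) (out : Int) : Prop := out = header_diff_count_py_alt left right
instance (left : List (String × String)) (right : List (String × String)) (out : Int) : Decidable (Spec_header_diff_count_py left right out) := by unfold Spec_header_diff_count_py; infer_instance

-- ===== CLAIM (what is proved, stated in full; the proofs are below) =====
def Claim_equal_header_diff_count_py : Prop := ∀ (left : List (String × String)) (right : List (String × String)), Dom_header_diff_count_py left right → Spec_header_diff_count_py left right (header_diff_count_py left right)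

-- ===== LEMMAS AND PROOFS =====

theorem pvNorm_keys_nodup (hs : List (String × String)) : (pvNorm hs).keys.Nodup := by
  unfold pvNorm
  have h : ∀ (d : PySem.Dict String String), d.keys.Nodup → (hs.foldl pvNormStep d).keys.Nodup := by
    induction hs with
    | nil => intro d hd; simpa using hd
    | cons x t ih =>
      intro d hd
      simp only [List.foldl_cons]
      apply ih
      unfold pvNormStep
      split
      · exact hd
      · exact PySem.Dict.nodup_keys_insert _ _ _ hd
  exact h _ PySem.Dict.nodup_keys_empty

theorem pv_filt_mem (d : PySem.Dict String String) (hnd : d.keys.Nodup) (k v : String) :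
    (k, v) ∈ d.items.filter (fun p => p.2 ≠ "") ↔ d.get? k = some v ∧ v ≠ "" := by
  rw [List.mem_filter, ← PySem.Dict.get?_eq_some_iff_mem_items d k v hnd]
  simp

theorem pv_diffkeys_iff (A B : PySem.Dict String String)
    (ha : A.keys.Nodup) (hb : B.keys.Nodup) (k : String) :
    k ∈ (PySem.Set.symmDiff (PySem.Set.ofList (A.items.filter (fun p => p.2 ≠ "")))
          (PySem.Set.ofList (B.items.filter (fun p => p.2 ≠ "")))).map (·.1)
      ↔ A.getD k "" ≠ B.getD k "" := by
  constructor
  · rintro hmem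
    rcases List.mem_map.mp hmem with ⟨⟨k', v⟩, hp, hk⟩
    cases hk
    rcases (PySem.Set.mem_symmDiff _ _ _).mp hp with ⟨h1, h2⟩ | ⟨h1, h2⟩
    · rw [PySem.Set.mem_ofList] at h1 h2
      rcases (pv_filt_mem A ha k' v).mp h1 with ⟨hget, hv⟩
      rw [PySem.Dict.getD_eq_get?_getD, PySem.Dict.getD_eq_get?_getD, hget]
      intro heq
      apply h2
      rw [pv_filt_mem B hb k' v]
      cases hgb : B.get? k' with
      | none => simp [hgb] at heq; exact absurd heq hv
      | some w => simp [hgb] at heq; exact ⟨by simp [heq], hv⟩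
    · rw [PySem.Set.mem_ofList] at h1 h2
      rcases (pv_filt_mem B hb k' v).mp h1 with ⟨hget, hv⟩
      rw [PySem.Dict.getD_eq_get?_getD, PySem.Dict.getD_eq_get?_getD, hget]
      intro heq
      apply h2
      rw [pv_filt_mem A ha k' v]
      cases hga : A.get? k' with
      | none => simp [hga] at heq; exact absurd heq hv
      | some w => simp [hga] at heq; exact ⟨by simp [heq], hv⟩
  · intro hne
    rw [PySem.Dict.getD_eq_get?_getD, PySem.Dict.getD_eq_get?_getD] at hne
    cases hga : A.get? k with
    | none =>
      cases hgb : B.get? k with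
      | none => simp [hga, hgb] at hne
      | some w =>
        refine List.mem_map.mpr ⟨(k, w), (PySem.Set.mem_symmDiff _ _ _).mpr (Or.inr ⟨?_, ?_⟩), rfl⟩
        · rw [PySem.Set.mem_ofList, pv_filt_mem B hb]
          refine ⟨hgb, fun h => ?_⟩
          simp [hga, hgb, h] at hne
        · rw [PySem.Set.mem_ofList, pv_filt_mem A ha]
          simp [hga]
    | some v =>
      by_cases hv : v = ""
      · subst hv
        cases hgb : B.get? k with
        | none => simp [hga, hgb] at hne
        | some w =>
          refine List.mem_map.mpr ⟨(k, w), (PySem.Set.mem_symmDiff _ _ _).mpr (Or.inr ⟨?_, ?_⟩), rfl⟩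
          · rw [PySem.Set.mem_ofList, pv_filt_mem B hb]
            refine ⟨hgb, fun h => ?_⟩
            simp [hga, hgb, h] at hne
          · rw [PySem.Set.mem_ofList, pv_filt_mem A ha]
            rintro ⟨h1, h2⟩
            rw [hga] at h1
            simp at h1
            exact h2 h1
      · refine List.mem_map.mpr ⟨(k, v), (PySem.Set.mem_symmDiff _ _ _).mpr (Or.inl ⟨?_, ?_⟩), rfl⟩
        · rw [PySem.Set.mem_ofList, pv_filt_mem A ha]
          exact ⟨hga, hv⟩
        · rw [PySem.Set.mem_ofList, pv_filt_mem B hb]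
          rintro ⟨h1, h2⟩
          rw [h1] at hne
          simp [hga] at hne

theorem pv_not_mem_keys_getD (d : PySem.Dict String String) (k : String)
    (h : k ∉ d.keys) : d.getD k "" = "" := by
  apply PySem.Dict.getD_of_not_contains
  by_contra hc
  simp only [Bool.not_eq_false] at hc
  exact h ((PySem.Dict.contains_iff_mem_keys _ _).mp hc)

-- ===== VERDICT (by name: the statement is the Claim_ definition above) =====
theorem header_diff_count_py_spec : Claim_equal_header_diff_count_py := by
  intro left right _
  unfold Spec_header_diff_count_py header_diff_count_py header_diff_count_py_alt
  have ha := pvNorm_keys_nodup left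
  have hb := pvNorm_keys_nodup right
  set A := pvNorm left with hA
  set B := pvNorm right with hB
  rw [PySem.List.foldl_ite_add_one]
  rw [List.countP_eq_length_filter]
  have hperm : ((PySem.Set.union (PySem.Set.ofList A.keys) B.keys).filter
        (fun key => decide (A.getD key "" ≠ B.getD key ""))).Perm
      (PySem.Set.ofList ((PySem.Set.symmDiff
          (PySem.Set.ofList (A.items.filter (fun p => p.2 ≠ "")))
          (PySem.Set.ofList (B.items.filter (fun p => p.2 ≠ "")))).map (·.1))) := by
    apply (List.perm_ext_iff_of_nodup ?_ ?_).mpr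
    · intro k
      rw [List.mem_filter, PySem.Set.mem_ofList, pv_diffkeys_iff A B ha hb k]
      constructor
      · rintro ⟨_, h⟩; simpa using h
      · intro h
        refine ⟨?_, by simpa using h⟩
        rw [PySem.Set.mem_union, PySem.Set.mem_ofList]
        by_contra hn
        rw [not_or] at hn
        rw [pv_not_mem_keys_getD A k hn.1, pv_not_mem_keys_getD B k hn.2] at h
        exact h rfl
    · exact List.Nodup.filter _ (PySem.Set.nodup_union _ _ (PySem.Set.nodup_ofList _))
    · exact PySem.Set.nodup_ofList _
  rw [hperm.length_eq]
  simp
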